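-- pv_equiv track=rewrite | github.com/dkratzert/FinalCif | finalcif/tools/chemparse.py | get_first_elem
-- ===== SOURCE A (Python) =====
-- from typing import Generator
-- from typing import Any
--
-- def find_all(sub: str, a_str: str) -> Generator[int, Any, None]:
--     start: int = 0
--     while True:
--         start = a_str.find(sub, start)
--         if start == -1:
--             return
--         yield start
--         start += len(sub)  # use start += 1 to find overlapping matches
--
-- def get_first_elem(formula: str) -> tuple[str, bool]:
--     needed_split: bool = False
--     for char in formula:
--         if formula.find(char) != 0 and (char.isupper() or char == "+" or char == "-"):
--             formula = formula.split(char)[0]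
--             needed_split = True
--             return formula, needed_split
--
--         char_ind = list(find_all(char, formula))
--         if len(char_ind) > 1 and (char.isupper() or char == "+" or char == "-") and (
--                 formula[1] == char or formula[1].islower()) and sum(
--             1 for c in formula[0:char_ind[1]] if c.isupper()) == 1:
--             formula = formula[0:char_ind[1]]
--             needed_split = True
--             return formula, needed_split
--
--     return formula, needed_split
-- ===== SOURCE B (Python) =====
-- def get_first_elem(formula):
--     if not formula:
--         return formula, False
--     c0 = formula[0]
--     if c0.isupper() or c0 == "+" or c0 == "-":
--         j = formula.find(c0, 1)
--         if j != -1 and (formula[1] == c0 or formula[1].islower()) \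
--                 and sum(1 for c in formula[:j] if c.isupper()) == 1:
--             return formula[:j], True
--     for i in range(1, len(formula)):
--         c = formula[i]
--         if (c.isupper() or c == "+" or c == "-") and c != c0:
--             return formula[:i], True
--     return formula, False
-- ===== Notes on version B (the rewrite author's own statement) =====
-- stated objective: faster
-- what changed: A rescans the whole string for every character (find, a full find_all occurrence list, a split and an uppercase sum per iteration); B does one O(n) check of the head character's second occurrence plus a single indexed left-to-right scan for the first uppercase/+/- character different from the head, with no per-character rescans.
import Mathlib
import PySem

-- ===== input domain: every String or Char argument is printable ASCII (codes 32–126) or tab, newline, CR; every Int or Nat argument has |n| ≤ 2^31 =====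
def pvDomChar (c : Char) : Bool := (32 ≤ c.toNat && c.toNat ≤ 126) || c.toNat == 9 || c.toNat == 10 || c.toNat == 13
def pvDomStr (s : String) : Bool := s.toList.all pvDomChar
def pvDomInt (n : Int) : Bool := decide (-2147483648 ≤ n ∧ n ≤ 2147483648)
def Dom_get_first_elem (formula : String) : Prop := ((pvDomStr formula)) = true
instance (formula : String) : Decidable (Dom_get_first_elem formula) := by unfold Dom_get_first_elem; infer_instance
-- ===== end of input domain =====

-- B replaces A's per-character rescans (find_all list, split) by one head check plus a single
-- indexed left-to-right scan; objective: faster (A is quadratic, B linear).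

-- ===== PORT A =====

-- `char.isupper() or char == "+" or char == "-"` (both Pythons test this)
def pvSpecial (c : Char) : Bool := PySem.Chars.isupper c || c == '+' || c == '-'

-- find_all: the while loop over a_str.find(sub, start); fuel (length+1) dominates the number of
-- iterations, since each found index is past the previous start
def pvFindAllGo (c : Char) (f : List Char) (start : Int) : Nat → List Int
  | 0 => []
  | fuel + 1 =>
    let r := PySem.Chars.findFrom f [c] start
    if r = -1 then [] else r :: pvFindAllGo c f (r + 1) fuel

def pvFindAll (c : Char) (f : List Char) : List Int := pvFindAllGo c f 0 (f.length + 1)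

-- the bound formula[0:char_ind[1]] of A's second branch (char_ind[1] guarded by len > 1)
def pvCut2 (f : List Char) (c : Char) : List Char :=
  PySem.Chars.slice f none (some ((PySem.List.pyGet? (pvFindAll c f) 1).getD 0))

-- A's second if-condition; the 0/1-genexpr sum over the uppercase filter is the uppercase count
def pvCond2 (f : List Char) (c : Char) : Bool :=
  decide (1 < (pvFindAll c f).length) && pvSpecial c &&
    (match PySem.List.pyGet? f 1 with
     | some d => d == c || PySem.Chars.islower d
     | none => false) &&
    ((pvCut2 f c).countP (fun ch => PySem.Chars.isupper ch) == 1)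

-- A's for-loop: formula is never reassigned before a return, so the whole string f is carried along
def pvLoopA (f : List Char) : List Char → String × Bool
  | [] => (String.ofList f, false)
  | c :: rest =>
    if PySem.Chars.find f [c] ≠ 0 ∧ pvSpecial c = true then
      (String.ofList ((PySem.Chars.splitOn f [c]).headD []), true)
    else if pvCond2 f c then (String.ofList (pvCut2 f c), true)
    else pvLoopA f rest

def get_first_elem (formula : String) : String × Bool :=
  pvLoopA formula.toList formula.toList

-- ===== PORT B =====

-- B's index loop `for i in range(1, len(formula))`
def pvLoopB (g : List Char) (c0 : Char) (i : Nat) : String × Bool :=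
  if h : i < g.length then
    if pvSpecial g[i] && !(g[i] == c0) then (String.ofList (g.take i), true)
    else pvLoopB g c0 (i + 1)
  else (String.ofList g, false)
  termination_by g.length - i

def get_first_elem_alt (formula : String) : String × Bool :=
  let g := formula.toList
  match g.head? with
  | none => (formula, false)
  | some c0 =>
    if pvSpecial c0 then
      if (PySem.Chars.findFrom g [c0] 1 != -1) &&
         (match PySem.List.pyGet? g 1 with
          | some d => d == c0 || PySem.Chars.islower d
          | none => false) &&
         ((g.take (PySem.Chars.findFrom g [c0] 1).toNat).countP
            (fun ch => PySem.Chars.isupper ch) == 1) then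
        (String.ofList (g.take (PySem.Chars.findFrom g [c0] 1).toNat), true)
      else pvLoopB g c0 1
    else pvLoopB g c0 1

-- ===== PRECONDITION & SPEC =====
def Spec_get_first_elem (formula : String) (out : String × Bool) : Prop := out = get_first_elem_alt formula
instance (formula : String) (out : String × Bool) : Decidable (Spec_get_first_elem formula out) := by unfold Spec_get_first_elem; infer_instance

-- ===== CLAIM (what is proved, stated in full; the proofs are below) =====
def Claim_equal_get_first_elem : Prop := ∀ (formula : String), Dom_get_first_elem formula → Spec_get_first_elem formula (get_first_elem formula)

-- ===== LEMMAS AND PROOFS =====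

theorem pv_singleton_prefix_iff (a : Char) (l : List Char) : ([a] <+: l) ↔ l.head? = some a := by
  cases l with
  | nil => simp
  | cons x t => simp [eq_comm]

theorem pv_singleton_prefix_drop (c : Char) (l : List Char) (i : Nat) :
    ([c] <+: l.drop i) ↔ l[i]? = some c := by
  rw [pv_singleton_prefix_iff, List.head?_drop]

-- find of a single character is Lean's findIdx when the character occurs
theorem pv_find_singleton (l : List Char) (c : Char) :
    PySem.Chars.find l [c] = if c ∈ l then ((l.findIdx (· == c) : Nat) : Int) else -1 := by
  by_cases h : c ∈ l
  · simp only [h, if_pos]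
    have hne : PySem.Chars.find l [c] ≠ -1 := by
      rw [PySem.Chars.find_ne_neg_one_iff, List.singleton_infix_iff]; exact h
    have hnn : 0 ≤ PySem.Chars.find l [c] := by
      rcases (PySem.Chars.neg_one_le_find l [c]).lt_or_eq with h' | h'
      · omega
      · omega
    obtain ⟨hpre, hmin⟩ := PySem.Chars.find_spec hnn
    have hlt : (PySem.Chars.find l [c]).toNat < l.length := by
      by_contra hge
      rw [List.drop_eq_nil_of_le (by omega)] at hpre
      simp at hpre
    have : l.findIdx (· == c) = (PySem.Chars.find l [c]).toNat := by
      rw [List.findIdx_eq hlt]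
      constructor
      · rw [pv_singleton_prefix_drop] at hpre
        simp_all
      · intro j hj
        have := hmin j hj
        rw [pv_singleton_prefix_drop] at this
        simp only [beq_eq_false_iff_ne, ne_eq]
        intro hc
        exact this (by rw [List.getElem?_eq_getElem (by omega), hc])
    omega
  · simp only [h, if_false]
    by_contra hne
    have : PySem.Chars.find l [c] ≠ -1 := hne
    rw [PySem.Chars.find_ne_neg_one_iff, List.singleton_infix_iff] at this
    exact h this

theorem pv_splitOn_go_acc (sep : List Char) (fuel : Nat) (l cur : List Char) (acc : List (List Char)) :
    PySem.Chars.splitOn.go sep fuel l cur acc = acc.reverse ++ PySem.Chars.splitOn.go sep fuel l cur [] := by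
  induction fuel generalizing l cur acc with
  | zero => simp [PySem.Chars.splitOn.go]
  | succ n ih =>
    cases l with
    | nil => simp [PySem.Chars.splitOn.go]
    | cons x t =>
      rw [PySem.Chars.splitOn.go, PySem.Chars.splitOn.go]
      by_cases hp : sep.isPrefixOf (x :: t)
      · simp only [hp, if_true]
        rw [ih _ _ (cur.reverse :: acc), ih _ _ [cur.reverse]]
        simp
      · simp only [hp, Bool.false_eq_true, if_false]
        rw [ih t (x :: cur) acc]

theorem pv_splitOn_go_head (c : Char) (fuel : Nat) (l cur : List Char) (hf : l.length < fuel) :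
    (PySem.Chars.splitOn.go [c] fuel l cur []).head? =
      some (cur.reverse ++ l.take (l.findIdx (· == c))) := by
  induction fuel generalizing l cur with
  | zero => omega
  | succ n ih =>
    cases l with
    | nil => simp [PySem.Chars.splitOn.go]
    | cons x t =>
      rw [PySem.Chars.splitOn.go]
      by_cases hx : x = c
      · have hp : List.isPrefixOf [c] (x :: t) = true := by simp [List.isPrefixOf, hx]
        simp only [hp, if_true]
        rw [pv_splitOn_go_acc]
        simp [List.findIdx_cons, hx]
      · have hp : List.isPrefixOf [c] (x :: t) = false := by
          simp [List.isPrefixOf]; exact fun h => (hx h.symm).elim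
        simp only [hp, Bool.false_eq_true, if_false]
        rw [ih t (x :: cur) (by simpa using Nat.lt_of_succ_lt_succ hf)]
        have hxc : ((x == c) : Bool) = false := by simp [hx]
        simp [List.findIdx_cons, hxc]

-- the first piece of formula.split(char) is the prefix before the first occurrence
theorem pv_splitOn_singleton_headD (f : List Char) (c : Char) :
    (PySem.Chars.splitOn f [c]).headD [] = f.take (f.findIdx (· == c)) := by
  have h := pv_splitOn_go_head c (f.length + 1) f [] (by omega)
  rw [PySem.Chars.splitOn]
  cases hg : (PySem.Chars.splitOn.go [c] (f.length + 1) f [] []) with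
  | nil => rw [hg] at h; simp at h
  | cons a t => rw [hg] at h; simp at h; simp [h]

-- find of the first character is 0
theorem pv_find_head (f : List Char) (c0 : Char) (h : f.head? = some c0) :
    PySem.Chars.find f [c0] = 0 := by
  cases f with
  | nil => simp at h
  | cons a t =>
    simp only [List.head?_cons, Option.some.injEq] at h
    subst h
    rw [pv_find_singleton]
    simp [List.findIdx_cons]

-- the main loop correspondence: once A's iteration-0 (second-branch) check has failed, A's
-- character loop from position k and B's index loop from k agree, provided no earlier
-- position ≥ 1 triggers
theorem pv_loopAB (f : List Char) (c0 : Char) (hhead : f.head? = some c0)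
    (H0 : ¬ pvCond2 f c0 = true) :
    ∀ n k, f.length - k = n → 1 ≤ k →
      (∀ j (hj : j < f.length), 1 ≤ j → j < k → ¬(pvSpecial f[j] = true ∧ f[j] ≠ c0)) →
      pvLoopA f (f.drop k) = pvLoopB f c0 k := by
  intro n
  induction n with
  | zero =>
    intro k hn _ _
    have hk : f.length ≤ k := by omega
    rw [List.drop_eq_nil_of_le hk, pvLoopB]
    simp [pvLoopA, Nat.not_lt.2 hk]
  | succ n ih =>
    intro k hn hk1 hprev
    have hk : k < f.length := by omega
    have h0 : f[0] = c0 := by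
      have hl : 0 < f.length := by omega
      have := List.head?_eq_getElem? (l := f)
      rw [hhead, List.getElem?_eq_getElem hl] at this
      exact (Option.some.injEq _ _ ▸ this.symm)
    rw [List.drop_eq_getElem_cons hk]
    by_cases htrig : pvSpecial f[k] = true ∧ f[k] ≠ c0
    · -- A's first branch fires, and k is the first occurrence of f[k]
      have hidx : f.findIdx (· == f[k]) = k := by
        rw [List.findIdx_eq hk]
        refine ⟨by simp, fun j hj => ?_⟩
        simp only [beq_eq_false_iff_ne, ne_eq]
        intro hcj
        rcases Nat.eq_zero_or_pos j with h | h
        · subst h; rw [h0] at hcj; exact htrig.2 hcj.symm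
        · exact hprev j (by omega) h hj
            ⟨by rw [hcj]; exact htrig.1, by rw [hcj]; exact htrig.2⟩
      have hfind : PySem.Chars.find f [f[k]] = (k : Int) := by
        rw [pv_find_singleton, if_pos (List.getElem_mem hk), hidx]
      simp only [pvLoopA]
      rw [if_pos ⟨by rw [hfind]; exact_mod_cast (by omega : (k : Int) ≠ 0), htrig.1⟩]
      rw [pvLoopB, dif_pos hk, if_pos (by simp [htrig.1, htrig.2])]
      rw [pv_splitOn_singleton_headD, hidx]
    · -- no trigger at position k: both loops advance
      have hA1 : ¬(PySem.Chars.find f [f[k]] ≠ 0 ∧ pvSpecial f[k] = true) := by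
        intro ⟨hne, hsp⟩
        rcases not_and_or.1 htrig with h | h
        · exact h hsp
        · have hcc : f[k] = c0 := not_not.1 (by simpa using h)
          rw [hcc] at hne
          exact hne (pv_find_head f c0 hhead)
      have hA2 : ¬ pvCond2 f f[k] = true := by
        by_cases hsp : pvSpecial f[k] = true
        · have hcc0 : f[k] = c0 := by
            rcases not_and_or.1 htrig with h | h
            · exact absurd hsp h
            · exact not_not.1 (by simpa using h)

          rw [hcc0]; exact H0
        · simp [pvCond2, Bool.eq_false_iff.2 hsp]
      simp only [pvLoopA]
      rw [if_neg hA1, if_neg hA2]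
      rw [pvLoopB, dif_pos hk,
        if_neg (by
          intro hb
          simp only [Bool.and_eq_true, Bool.not_eq_eq_eq_not, Bool.not_true,
            beq_eq_false_iff_ne, ne_eq] at hb
          exact htrig ⟨hb.1, hb.2⟩)]
      exact ih (k + 1) (by omega) (by omega)
        (fun j hj h1 hjk => by
          rcases Nat.lt_or_ge j k with h | h
          · exact hprev j hj h1 h
          · have hjeq : j = k := by omega
            subst hjeq; exact htrig)

-- unfolding A's find_all for the head character: [0, findFrom f [c0] 1, …]
theorem pv_findAll_head (c0 : Char) (t : List Char) :
    pvFindAll c0 (c0 :: t) =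
      0 :: (if PySem.Chars.findFrom (c0 :: t) [c0] 1 = -1 then []
            else PySem.Chars.findFrom (c0 :: t) [c0] 1 ::
              pvFindAllGo c0 (c0 :: t) (PySem.Chars.findFrom (c0 :: t) [c0] 1 + 1) t.length) := by
  rw [pvFindAll]
  have hlen : (c0 :: t).length + 1 = (t.length + 1) + 1 := by simp
  rw [hlen, pvFindAllGo]
  simp only [PySem.Chars.findFrom_zero, pv_find_head (c0 :: t) c0 rfl]
  norm_num
  rw [pvFindAllGo]

theorem get_first_elem_eq (formula : String) :
    get_first_elem formula = get_first_elem_alt formula := by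
  rw [get_first_elem, get_first_elem_alt]
  cases hg : formula.toList with
  | nil =>
    have hform : formula = String.ofList [] := String.toList_inj.mp (by simp [hg])
    simp [pvLoopA, hform]
  | cons c0 t =>
    simp only [List.head?_cons]
    have hloopAeq : pvLoopA (c0 :: t) (c0 :: t) =
        (if PySem.Chars.find (c0 :: t) [c0] ≠ 0 ∧ pvSpecial c0 = true then
          (String.ofList ((PySem.Chars.splitOn (c0 :: t) [c0]).headD []), true)
        else if pvCond2 (c0 :: t) c0 then (String.ofList (pvCut2 (c0 :: t) c0), true)
        else pvLoopA (c0 :: t) t) := rfl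
    rw [hloopAeq, if_neg (by rw [pv_find_head (c0 :: t) c0 rfl]; simp)]
    have hfa := pv_findAll_head c0 t
    by_cases hjm : PySem.Chars.findFrom (c0 :: t) [c0] 1 = -1
    · -- no second occurrence of the head character
      have hflen : (pvFindAll c0 (c0 :: t)).length = 1 := by
        rw [hfa, if_pos hjm]; rfl
      have hc2 : ¬ pvCond2 (c0 :: t) c0 = true := by simp [pvCond2, hflen]
      rw [if_neg hc2]
      have hL := pv_loopAB (c0 :: t) c0 rfl hc2 ((c0 :: t).length - 1) 1 rfl le_rfl
        (fun j _ h1 hj1 => by omega)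
      simp only [List.drop_succ_cons, List.drop_zero] at hL
      rw [hL]
      by_cases hsp : pvSpecial c0 = true
      · rw [if_pos hsp, if_neg (by simp [hjm])]
      · rw [if_neg hsp]
    · -- a second occurrence exists; both sides read the same prefix
      have hjge : 1 ≤ PySem.Chars.findFrom (c0 :: t) [c0] 1 := by
        have hspec := PySem.Chars.findFrom_natCast_spec (c0 :: t) [c0] 1 (by simp)
        rw [Nat.cast_one] at hspec
        exact (hspec hjm).1
      have hci : pvFindAll c0 (c0 :: t) =
          0 :: PySem.Chars.findFrom (c0 :: t) [c0] 1 ::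
            pvFindAllGo c0 (c0 :: t) (PySem.Chars.findFrom (c0 :: t) [c0] 1 + 1) t.length := by
        rw [hfa, if_neg hjm]
      have hget : (PySem.List.pyGet? (pvFindAll c0 (c0 :: t)) 1).getD 0 =
          PySem.Chars.findFrom (c0 :: t) [c0] 1 := by
        rw [hci]; simp [PySem.List.pyGet?, PySem.List.pyIdx?]
      have hcut : pvCut2 (c0 :: t) c0 =
          (c0 :: t).take (PySem.Chars.findFrom (c0 :: t) [c0] 1).toNat := by
        rw [pvCut2, hget, PySem.Chars.slice_eq_listSlice, PySem.List.slice_to _ (by omega)]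
      have hcount : pvCond2 (c0 :: t) c0 =
          (pvSpecial c0 &&
            (match PySem.List.pyGet? (c0 :: t) 1 with
             | some d => d == c0 || PySem.Chars.islower d
             | none => false) &&
            (((c0 :: t).take (PySem.Chars.findFrom (c0 :: t) [c0] 1).toNat).countP
              (fun ch => PySem.Chars.isupper ch) == 1)) := by
        rw [pvCond2, hcut, hci]
        simp [Bool.and_assoc]
      by_cases hc2 : pvCond2 (c0 :: t) c0 = true
      · rw [if_pos hc2]
        have hparts := hcount ▸ hc2
        simp only [Bool.and_eq_true] at hparts
        rw [if_pos hparts.1.1]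
        rw [if_pos (by
          simp only [Bool.and_eq_true, bne_iff_ne, ne_eq]
          exact ⟨⟨hjm, hparts.1.2⟩, hparts.2⟩)]
        rw [hcut]
      · rw [if_neg hc2]
        have hL := pv_loopAB (c0 :: t) c0 rfl hc2 ((c0 :: t).length - 1) 1 rfl le_rfl
          (fun j _ h1 hj1 => by omega)
        simp only [List.drop_succ_cons, List.drop_zero] at hL
        rw [hL]
        by_cases hsp : pvSpecial c0 = true
        · rw [if_pos hsp, if_neg (by
            intro hb
            simp only [Bool.and_eq_true, bne_iff_ne, ne_eq] at hb
            exact hc2 (by rw [hcount]; simp [hsp, hb.1.2, hb.2]))]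
        · rw [if_neg hsp]

-- ===== VERDICT (by name: the statement is the Claim_ definition above) =====
theorem get_first_elem_spec : Claim_equal_get_first_elem := by
  intro formula _
  unfold Spec_get_first_elem
  exact get_first_elem_eq formula
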